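-- pv_equiv track=rewrite | github.com/lightbits/euler | problem38.py | concatenateProduct
-- ===== SOURCE A (Python) =====
-- import math
--
-- def pow10(n):
-- 	result = 1
-- 	for i in range(n):
-- 		result *= 10
-- 	return result
--
-- def concatenateProduct(i):
-- 	cat = i
-- 	digit_count = int(math.log10(cat)) + 1
-- 	k = 2
-- 	while digit_count < 9:
-- 		pp = i * k
-- 		pp_digits = int(math.log10(pp)) + 1
-- 		digit_count += pp_digits
-- 		cat *= pow10(pp_digits)
-- 		cat += pp
-- 		k += 1
-- 	return cat
-- ===== SOURCE B (Python) =====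
-- def ndigits(n):
--     return 1 if n < 10 else 1 + ndigits(n // 10)
--
-- def concatenateProduct(i):
--     # stage 1: gather the multiples of i with their digit lengths until 9 digits in total
--     pieces, total, k = [], 0, 0
--     while total < 9:
--         k += 1
--         p = i * k
--         d = ndigits(p)
--         pieces.append((p, d))
--         total += d
--     # stage 2: assemble the concatenation back-to-front with a place-value accumulator
--     res, place = 0, 1
--     for p, d in reversed(pieces):
--         res += p * place
--         place *= 10 ** d
--     return res
-- ===== Notes on version B (the rewrite author's own statement) =====
-- stated objective: alternative
-- what changed: B replaces A's single forward loop (shifting one integer accumulator via log10 digit counts and a pow10 helper) with two staged passes: first it materializes the list of (multiple, digit-length) pieces until 9 digits are gathered, then it assembles the result back-to-front over the reversed list with a place-value accumulator; digit lengths come from a recursive //10 counter instead of math.log10.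
import Mathlib
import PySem

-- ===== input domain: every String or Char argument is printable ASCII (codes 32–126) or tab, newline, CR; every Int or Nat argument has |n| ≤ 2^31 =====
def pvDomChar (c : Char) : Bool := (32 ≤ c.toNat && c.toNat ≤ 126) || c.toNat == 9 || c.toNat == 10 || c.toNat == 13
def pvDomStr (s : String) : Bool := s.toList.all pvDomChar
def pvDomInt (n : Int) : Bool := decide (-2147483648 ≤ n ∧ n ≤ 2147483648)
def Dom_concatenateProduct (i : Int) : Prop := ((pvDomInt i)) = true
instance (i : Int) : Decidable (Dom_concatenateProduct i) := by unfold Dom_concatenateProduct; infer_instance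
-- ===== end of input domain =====

-- B replaces A's forward shifting loop (log10/pow10) by two staged passes: collect the
-- (multiple, digit-length) pieces, then assemble back-to-front with a place-value accumulator
-- (objective: alternative, same cost).


-- ===== PORT A =====
-- pow10(n): result = 1; for i in range(n): result *= 10
def pvPow10 (n : Int) : Int :=
  (PySem.List.pyRange 0 n 1).foldl (fun r _ => r * 10) 1

-- hand port of int(math.log10(x)) for a positive int x: the floor of log10, exact on the
-- domain (every value A feeds to log10 fits well inside double precision for |i| ≤ 2^31);
-- for x ≤ 0 Python raises ValueError (excluded by Pre_).
def pvFloorLog10 (n : Nat) : Nat :=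
  if n < 10 then 0 else pvFloorLog10 (n / 10) + 1

-- the while loop of A, state (cat, digit_count, k)
def concatLoopA (i cat dc k : Int) : Int :=
  if dc < 9 then
    let pp := i * k
    let ppd : Int := (pvFloorLog10 pp.toNat : Int) + 1
    concatLoopA i (cat * pvPow10 ppd + pp) (dc + ppd) (k + 1)
  else cat
termination_by (9 - dc).toNat
decreasing_by
  have h0 : (0 : Int) ≤ (pvFloorLog10 (i * k).toNat : Int) := Int.natCast_nonneg _
  omega

def concatenateProduct (i : Int) : Int :=
  concatLoopA i i ((pvFloorLog10 i.toNat : Int) + 1) 2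

-- ===== PORT B =====
-- ndigits(n): 1 if n < 10 else 1 + ndigits(n // 10)
def pvNdigits (n : Int) : Int :=
  if n < 10 then 1 else 1 + pvNdigits (PySem.Int.floordiv n 10)
termination_by n.toNat
decreasing_by
  have h := PySem.Int.floordiv_eq_ediv_of_pos (a := n) (b := 10) (by norm_num)
  rw [h]; omega

-- cited by stage1's decreasing_by (termination of B's first while loop)
theorem pvNdigits_pos (n : Int) : 1 ≤ pvNdigits n := by
  rw [pvNdigits]
  split
  · omega
  · have := pvNdigits_pos (PySem.Int.floordiv n 10)
    omega
termination_by n.toNat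
decreasing_by
  have h := PySem.Int.floordiv_eq_ediv_of_pos (a := n) (b := 10) (by norm_num)
  rw [h]; omega

-- stage 1: pieces, total, k state; appends (p, d) until total >= 9
def pvStage1 (i : Int) (pieces : List (Int × Int)) (total k : Int) : List (Int × Int) :=
  if total < 9 then
    pvStage1 i (pieces ++ [(i * (k + 1), pvNdigits (i * (k + 1)))])
      (total + pvNdigits (i * (k + 1))) (k + 1)
  else pieces
termination_by (9 - total).toNat
decreasing_by
  have := pvNdigits_pos (i * (k + 1))
  omega

-- stage 2: res += p * place; place *= 10 ** d, over reversed(pieces)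
def pvStep (rp : Int × Int) (pd : Int × Int) : Int × Int :=
  (rp.1 + pd.1 * rp.2, rp.2 * 10 ^ pd.2.toNat)

def concatenateProduct_alt (i : Int) : Int :=
  ((pvStage1 i [] 0 0).reverse.foldl pvStep (0, 1)).1

-- ===== PRECONDITION & SPEC =====
-- A raises ValueError for i ≤ 0 (math.log10 of a non-positive number); Pre_ excludes exactly those.
def Pre_concatenateProduct (i : Int) : Prop := 1 ≤ i
instance (i : Int) : Decidable (Pre_concatenateProduct i) := by unfold Pre_concatenateProduct; infer_instance
def pvWitness_concatenateProduct : Int := 9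

def Spec_concatenateProduct (i : Int) (out : Int) : Prop := out = concatenateProduct_alt i
instance (i : Int) (out : Int) : Decidable (Spec_concatenateProduct i out) := by unfold Spec_concatenateProduct; infer_instance

-- ===== CLAIM (what is proved, stated in full; the proofs are below) =====
def Claim_equal_concatenateProduct : Prop := ∀ (i : Int), Dom_concatenateProduct i → Pre_concatenateProduct i → Spec_concatenateProduct i (concatenateProduct i)

-- ===== LEMMAS AND PROOFS =====

theorem pvPow10_eq (n : Int) : pvPow10 n = 10 ^ n.toNat := by
  unfold pvPow10
  have hfold : ∀ (l : List Int) (a : Int), l.foldl (fun r _ => r * 10) a = a * 10 ^ l.length := by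
    intro l
    induction l with
    | nil => intro a; simp
    | cons x xs ih => intro a; simp [List.foldl, ih]; ring
  rw [hfold, PySem.List.length_pyRange_one]
  simp

-- B's recursive digit counter agrees with A's floor-log10 count on positive ints
theorem pvNdigits_eq (n : Int) (hn : 1 ≤ n) :
    pvNdigits n = (pvFloorLog10 n.toNat : Int) + 1 := by
  rw [pvNdigits, pvFloorLog10]
  split
  · rename_i h
    rw [if_pos (by omega)]
    norm_num
  · rename_i h
    have h10 : (10 : Int) ≤ n := by omega
    rw [if_neg (by omega)]
    have hd := PySem.Int.floordiv_eq_ediv_of_pos (a := n) (b := 10) (by norm_num)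
    have ih := pvNdigits_eq (PySem.Int.floordiv n 10) (by rw [hd]; omega)
    rw [ih]
    have ht : (PySem.Int.floordiv n 10).toNat = n.toNat / 10 := by rw [hd]; omega
    rw [ht]
    push_cast
    ring
termination_by n.toNat
decreasing_by
  have h := PySem.Int.floordiv_eq_ediv_of_pos (a := n) (b := 10) (by norm_num)
  rw [h]; omega

-- the pieces accumulator factors out of stage 1
theorem pvStage1_append (i : Int) : ∀ (pieces : List (Int × Int)) (total k : Int),
    pvStage1 i pieces total k = pieces ++ pvStage1 i [] total k := by
  intro pieces total k
  by_cases h : total < 9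
  · conv_lhs => rw [pvStage1]
    conv_rhs => rw [pvStage1]
    rw [if_pos h, if_pos h]
    rw [pvStage1_append i (pieces ++ [(i * (k + 1), pvNdigits (i * (k + 1)))])
        (total + pvNdigits (i * (k + 1))) (k + 1),
      pvStage1_append i ([] ++ [(i * (k + 1), pvNdigits (i * (k + 1)))])
        (total + pvNdigits (i * (k + 1))) (k + 1)]
    simp
  · conv_lhs => rw [pvStage1]
    conv_rhs => rw [pvStage1]
    rw [if_neg h, if_neg h]
    simp
termination_by _ total _ => (9 - total).toNat
decreasing_by
  all_goals have := pvNdigits_pos (i * (k + 1)); omega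

-- A's loop equals "cat in front of the back-to-front assembly of the remaining pieces"
theorem pvLoopsAgree : ∀ (m : Nat) (i cat dc kk : Int), 1 ≤ i → 1 ≤ kk →
    (9 - dc).toNat ≤ m →
    concatLoopA i cat dc (kk + 1) =
      cat * ((pvStage1 i [] dc kk).reverse.foldl pvStep (0, 1)).2 +
        ((pvStage1 i [] dc kk).reverse.foldl pvStep (0, 1)).1 := by
  intro m
  induction m with
  | zero =>
    intro i cat dc kk hi hk hm
    rw [concatLoopA, pvStage1]
    rw [if_neg (by omega), if_neg (by omega)]
    simp
  | succ m ih =>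
    intro i cat dc kk hi hk hm
    rw [concatLoopA, pvStage1]
    by_cases hlt : dc < 9
    · rw [if_pos hlt, if_pos hlt]
      have hpp : 1 ≤ i * (kk + 1) := by nlinarith
      set pp := i * (kk + 1) with hppdef
      have hnd := pvNdigits_eq pp hpp
      set e := pvFloorLog10 pp.toNat with he
      have hrec := ih i (cat * pvPow10 ((e : Int) + 1) + pp) (dc + ((e : Int) + 1)) (kk + 1)
        hi (by omega)
        (by have h0 : (0 : Int) ≤ (e : Int) := Int.natCast_nonneg e; omega)
      rw [pvStage1_append]
      simp only [List.reverse_append, List.reverse_cons, List.reverse_nil, List.nil_append,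
        List.foldl_append, List.foldl_cons, List.foldl_nil]
      rw [hnd] at *
      set L := (pvStage1 i [] (dc + ((e : Int) + 1)) (kk + 1)).reverse with hL
      -- final fold step with the piece (pp, e+1)
      have hstep : pvStep (L.foldl pvStep (0, 1)) (pp, (e : Int) + 1) =
          ((L.foldl pvStep (0, 1)).1 + pp * (L.foldl pvStep (0, 1)).2,
           (L.foldl pvStep (0, 1)).2 * 10 ^ e.succ) := by
        have ht : ((e : Int) + 1).toNat = e.succ := by omega
        simp [pvStep, ht]
      rw [hstep]
      rw [hrec, pvPow10_eq]
      have ht : ((e : Int) + 1).toNat = e.succ := by omega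
      rw [ht]
      ring
    · rw [if_neg hlt, if_neg hlt]
      simp

-- ===== VERDICT (by name: the statements are the Claim_ definitions above) =====
theorem concatenateProduct_spec : Claim_equal_concatenateProduct := by
  intro i _ hpre
  have hi : (1 : Int) ≤ i := hpre
  unfold Spec_concatenateProduct concatenateProduct concatenateProduct_alt
  rw [pvStage1, if_pos (by omega : (0 : Int) < 9)]
  simp only [zero_add, List.nil_append, mul_one]
  rw [pvStage1_append i [(i, pvNdigits i)] (pvNdigits i) 1]
  have hnd := pvNdigits_eq i hi
  rw [hnd]
  set e := pvFloorLog10 i.toNat with he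
  have hmain := pvLoopsAgree 9 i i ((e : Int) + 1) 1 hi (by omega)
    (by have h0 : (0 : Int) ≤ (e : Int) := Int.natCast_nonneg e; omega)
  norm_num at hmain
  simp only [List.reverse_append, List.reverse_cons, List.reverse_nil, List.nil_append,
    List.foldl_append, List.foldl_cons, List.foldl_nil]
  rw [hmain]
  simp [pvStep]
  ring
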